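-- pv_equiv track=rewrite | github.com/dagahan/AMLS | backend/src/storage/db/reference_problem_bank.py | _build_problem_type_depth
-- ===== SOURCE A (Python) =====
-- def _build_problem_type_depth(
--     problem_type_name: str,
--     prerequisite_name_by_problem_type_name: dict[str, str | None],
-- ) -> int:
--     prerequisite_name = prerequisite_name_by_problem_type_name[problem_type_name]
--     if prerequisite_name is None:
--         return 0
--
--     return 1 + _build_problem_type_depth(
--         problem_type_name=prerequisite_name,
--         prerequisite_name_by_problem_type_name=prerequisite_name_by_problem_type_name,
--     )
-- ===== SOURCE B (Python) =====
-- def _build_problem_type_depth(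
--     problem_type_name: str,
--     prerequisite_name_by_problem_type_name: dict[str, str | None],
-- ) -> int:
--     # Bottom-up: compute the depth of every resolvable problem type once
--     # (fixed-point over the whole table), then answer with a single lookup.
--     depth_by_name = {
--         name: 0
--         for name, prerequisite in prerequisite_name_by_problem_type_name.items()
--         if prerequisite is None
--     }
--     changed = True
--     while changed:
--         changed = False
--         for name, prerequisite in prerequisite_name_by_problem_type_name.items():
--             if name not in depth_by_name and prerequisite is not None and prerequisite in depth_by_name:
--                 depth_by_name[name] = depth_by_name[prerequisite] + 1
--                 changed = True
--     return depth_by_name[problem_type_name]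
-- ===== Notes on version B (the rewrite author's own statement) =====
-- stated objective: alternative
-- what changed: Replaces A's top-down recursion along one prerequisite chain by a bottom-up fixed-point pass that builds a depth table for all resolvable problem types (seed the None-prerequisite types at depth 0, then repeatedly assign depth[prereq]+1 until no change) and answers with one lookup.
import Mathlib
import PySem

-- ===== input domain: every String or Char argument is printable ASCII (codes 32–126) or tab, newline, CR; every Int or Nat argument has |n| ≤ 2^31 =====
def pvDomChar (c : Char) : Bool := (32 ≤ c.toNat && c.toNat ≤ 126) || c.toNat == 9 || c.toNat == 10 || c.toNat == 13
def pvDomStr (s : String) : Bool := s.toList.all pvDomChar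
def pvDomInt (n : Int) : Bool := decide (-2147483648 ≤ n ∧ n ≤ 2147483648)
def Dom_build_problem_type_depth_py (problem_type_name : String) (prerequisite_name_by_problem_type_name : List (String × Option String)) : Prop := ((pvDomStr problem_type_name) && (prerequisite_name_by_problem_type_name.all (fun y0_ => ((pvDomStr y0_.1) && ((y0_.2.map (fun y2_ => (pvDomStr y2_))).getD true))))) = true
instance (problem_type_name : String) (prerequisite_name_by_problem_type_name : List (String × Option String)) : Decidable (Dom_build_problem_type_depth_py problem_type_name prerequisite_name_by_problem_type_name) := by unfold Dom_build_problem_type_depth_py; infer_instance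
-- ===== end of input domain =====

-- B replaces A's top-down recursion along one prerequisite chain by a bottom-up
-- fixed-point pass building a depth table for every resolvable problem type,
-- answered by a single lookup (different algorithm, not claimed faster).
-- A raises (KeyError / RecursionError) outside Pre_.

-- ===== PORT A =====
-- A's recursion '1 + _build_problem_type_depth(prereq, …)'; the fuel argument only
-- makes the Lean function total (Python A raises on chains that do not terminate,
-- which Pre_ excludes; under Pre_ the chain ends within the dict's size, so fuel
-- length+1 is never exhausted).
def pvGoA (d : PySem.Dict String (Option String)) : Nat → String → Int
  | 0, _ => 0
  | Nat.succ fuel, name =>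
    match d.get? name with
    | none => 0            -- KeyError in Python; excluded by Pre_
    | some none => 0
    | some (some p) => 1 + pvGoA d fuel p

def build_problem_type_depth_py (problem_type_name : String) (prerequisite_name_by_problem_type_name : List (String × Option String)) : Int :=
  pvGoA (PySem.Dict.mk prerequisite_name_by_problem_type_name) (prerequisite_name_by_problem_type_name.length + 1) problem_type_name

-- ===== PORT B =====
-- the dict comprehension '{name: 0 for name, prereq in d.items() if prereq is None}'
def pvInitB (items : List (String × Option String)) : PySem.Dict String Int :=
  items.foldl (fun t kv =>
    match kv.2 with
    | none => t.insert kv.1 0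
    | some _ => t) PySem.Dict.empty

-- one item of the inner 'for' loop: 'if name not in depth and prereq is not None and prereq in depth: depth[name] = depth[prereq] + 1; changed = True'
def pvStepB (t : PySem.Dict String Int × Bool) (kv : String × Option String) : PySem.Dict String Int × Bool :=
  if t.1.contains kv.1 then t
  else
    match kv.2 with
    | none => t
    | some p =>
      match t.1.get? p with
      | none => t
      | some dp => (t.1.insert kv.1 (dp + 1), true)

-- the 'while changed' loop; fuel only for totality (each changed round adds a key,
-- so items.length + 1 rounds always suffice — proved below for the claim)
def pvLoopB (items : List (String × Option String)) : Nat → PySem.Dict String Int → PySem.Dict String Int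
  | 0, t => t
  | Nat.succ fuel, t =>
    let st := items.foldl pvStepB (t, false)
    if st.2 then pvLoopB items fuel st.1 else st.1

def build_problem_type_depth_py_alt (problem_type_name : String) (prerequisite_name_by_problem_type_name : List (String × Option String)) : Int :=
  let d := PySem.Dict.mk prerequisite_name_by_problem_type_name
  let table := pvLoopB d.items (d.items.length + 1) (pvInitB d.items)
  (table.get? problem_type_name).getD 0   -- KeyError in Python when absent; Pre_ puts the key here

-- ===== PRECONDITION & SPEC =====
-- node reached after n forward hops along the prerequisite chain (none if a hop is missing or ends)
def pvNodeAt (d : PySem.Dict String (Option String)) : String → Nat → Option String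
  | k, 0 => some k
  | k, Nat.succ n =>
    match d.get? k with
    | some (some p) => pvNodeAt d p n
    | _ => none

-- Pre_ excludes (a) association lists with duplicate keys, which do not represent a
-- Python dict (first-match lookup here vs last-wins dict construction), and (b) inputs
-- whose prerequisite chain does not reach a None entry through present keys, on which
-- Python A raises (KeyError / RecursionError).
def Pre_build_problem_type_depth_py (problem_type_name : String) (prerequisite_name_by_problem_type_name : List (String × Option String)) : Prop :=
  (prerequisite_name_by_problem_type_name.map Prod.fst).Nodup ∧
  ∃ n ≤ prerequisite_name_by_problem_type_name.length,
    ∃ c, pvNodeAt (PySem.Dict.mk prerequisite_name_by_problem_type_name) problem_type_name n = some c ∧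
      (PySem.Dict.mk prerequisite_name_by_problem_type_name).get? c = some none

instance (problem_type_name : String) (prerequisite_name_by_problem_type_name : List (String × Option String)) : Decidable (Pre_build_problem_type_depth_py problem_type_name prerequisite_name_by_problem_type_name) := by
  unfold Pre_build_problem_type_depth_py; infer_instance

def pvWitness_build_problem_type_depth_py : String × (List (String × Option String)) :=
  ("a", [("a", some "b"), ("b", none)])

def Spec_build_problem_type_depth_py (problem_type_name : String) (prerequisite_name_by_problem_type_name : List (String × Option String)) (out : Int) : Prop := out = build_problem_type_depth_py_alt problem_type_name prerequisite_name_by_problem_type_name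
instance (problem_type_name : String) (prerequisite_name_by_problem_type_name : List (String × Option String)) (out : Int) : Decidable (Spec_build_problem_type_depth_py problem_type_name prerequisite_name_by_problem_type_name out) := by unfold Spec_build_problem_type_depth_py; infer_instance

-- ===== CLAIM =====
def Claim_equal_build_problem_type_depth_py : Prop := ∀ (problem_type_name : String) (prerequisite_name_by_problem_type_name : List (String × Option String)), Dom_build_problem_type_depth_py problem_type_name prerequisite_name_by_problem_type_name → Pre_build_problem_type_depth_py problem_type_name prerequisite_name_by_problem_type_name → Spec_build_problem_type_depth_py problem_type_name prerequisite_name_by_problem_type_name (build_problem_type_depth_py problem_type_name prerequisite_name_by_problem_type_name)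

-- ===== LEMMAS AND PROOFS =====

-- depth-n membership of the prerequisite relation: the chain from k reaches a None entry in exactly n hops
inductive PVDepth (d : PySem.Dict String (Option String)) : String → Int → Prop
  | zero {k : String} : d.get? k = some none → PVDepth d k 0
  | succ {k p : String} {n : Int} : d.get? k = some (some p) → PVDepth d p n → PVDepth d k (n + 1)

theorem pvdepth_nonneg {d : PySem.Dict String (Option String)} {k : String} {n : Int}
    (h : PVDepth d k n) : 0 ≤ n := by
  induction h with
  | zero _ => omega
  | succ _ _ ih => omega

theorem pvdepth_det {d : PySem.Dict String (Option String)} {k : String} {n m : Int}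
    (h : PVDepth d k n) (h' : PVDepth d k m) : n = m := by
  induction h generalizing m with
  | zero hk =>
    cases h' with
    | zero _ => rfl
    | succ hk' _ => rw [hk] at hk'; cases hk'
  | succ hk _ ih =>
    cases h' with
    | zero hk' => rw [hk] at hk'; cases hk'
    | succ hk' hp' =>
      rw [hk] at hk'
      cases hk'
      rw [ih hp']

theorem pvdepth_chain {d : PySem.Dict String (Option String)} {k : String} {n : Int}
    (h : PVDepth d k n) :
    ∃ l : List String, l.Nodup ∧ l.length = n.toNat + 1 ∧
      ∀ x ∈ l, x ∈ d.keys ∧ ∃ m, PVDepth d x m ∧ m ≤ n := by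
  induction h with
  | @zero k hk =>
    refine ⟨[k], List.nodup_singleton k, by simp, ?_⟩
    intro x hx
    simp only [List.mem_singleton] at hx
    subst hx
    refine ⟨?_, 0, PVDepth.zero hk, le_refl 0⟩
    by_contra hmem
    rw [← PySem.Dict.get?_eq_none_iff_not_mem_keys d x] at hmem
    rw [hk] at hmem
    cases hmem
  | @succ k p m hk hp ih =>
    obtain ⟨l, hnd, hlen, hmem⟩ := ih
    have hm0 : 0 ≤ m := pvdepth_nonneg hp
    refine ⟨k :: l, ?_, by simp [hlen]; omega, ?_⟩
    · refine List.nodup_cons.mpr ⟨?_, hnd⟩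
      intro hkl
      obtain ⟨-, m', hm', hle⟩ := hmem k hkl
      have := pvdepth_det hm' (PVDepth.succ hk hp)
      omega
    · intro x hx
      rcases List.mem_cons.mp hx with rfl | hx
      · refine ⟨?_, m + 1, PVDepth.succ hk hp, le_refl _⟩
        by_contra hmemk
        rw [← PySem.Dict.get?_eq_none_iff_not_mem_keys d x] at hmemk
        rw [hk] at hmemk
        cases hmemk
      · obtain ⟨h1, m', hm', hle⟩ := hmem x hx
        exact ⟨h1, m', hm', by omega⟩

theorem pvdepth_lt {d : PySem.Dict String (Option String)} {k : String} {n : Int}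
    (h : PVDepth d k n) : n.toNat < d.keys.length := by
  obtain ⟨l, hnd, hlen, hmem⟩ := pvdepth_chain h
  have hsub : l ⊆ d.keys := fun x hx => (hmem x hx).1
  have := (List.subperm_of_subset hnd hsub).length_le
  omega

theorem pvGoA_eq {d : PySem.Dict String (Option String)} {k : String} {n : Int}
    (h : PVDepth d k n) : ∀ fuel : Nat, n.toNat < fuel → pvGoA d fuel k = n := by
  induction h with
  | @zero k hk =>
    intro fuel hf
    match fuel, hf with
    | Nat.succ f, _ => simp [pvGoA, hk]
  | @succ k p m hk hp ih =>
    intro fuel hf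
    have hm0 : 0 ≤ m := pvdepth_nonneg hp
    match fuel, hf with
    | Nat.succ f, hf =>
      have : m.toNat < f := by omega
      simp [pvGoA, hk, ih f this]
      omega

theorem pvNodeAt_depth {d : PySem.Dict String (Option String)} :
    ∀ (n : Nat) (k c : String), pvNodeAt d k n = some c → d.get? c = some none →
      PVDepth d k (n : Int) := by
  intro n
  induction n with
  | zero =>
    intro k c hnode hend
    simp only [pvNodeAt] at hnode
    cases hnode
    exact PVDepth.zero hend
  | succ m ih =>
    intro k c hnode hend
    simp only [pvNodeAt] at hnode
    cases hd : d.get? k with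
    | none => rw [hd] at hnode; cases hnode
    | some o =>
      cases o with
      | none => rw [hd] at hnode; cases hnode
      | some p =>
        rw [hd] at hnode
        have := PVDepth.succ hd (ih p c hnode hend)
        have hcast : ((m : Int) + 1) = ((m + 1 : Nat) : Int) := by push_cast; ring
        rwa [hcast] at this

-- ---- B side ----

def PVGood (d : PySem.Dict String (Option String)) (t : PySem.Dict String Int) : Prop :=
  ∀ k v, t.get? k = some v → PVDepth d k v


-- every step either leaves the state unchanged or performs one fresh insert and raises the flag
theorem pvstep_cases (t : PySem.Dict String Int × Bool) (kv : String × Option String) :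
    pvStepB t kv = t ∨
      ∃ p dp, kv.2 = some p ∧ t.1.contains kv.1 = false ∧ t.1.get? p = some dp ∧
        pvStepB t kv = (t.1.insert kv.1 (dp + 1), true) := by
  by_cases hc : t.1.contains kv.1 = true
  · left; simp [pvStepB, hc]
  · cases ho : kv.2 with
    | none => left; simp [pvStepB, hc, ho]
    | some p =>
      cases hg : t.1.get? p with
      | none => left; simp [pvStepB, hc, ho, hg]
      | some dp =>
        right
        refine ⟨p, dp, rfl, by simpa using hc, hg, ?_⟩
        simp [pvStepB, hc, ho, hg]

theorem pvstep_mono {t : PySem.Dict String Int × Bool} {kv : String × Option String}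
    {x : String} {v : Int} (h : t.1.get? x = some v) : (pvStepB t kv).1.get? x = some v := by
  rcases pvstep_cases t kv with heq | ⟨p, dp, ho, hc, hg, heq⟩
  · rw [heq]; exact h
  · rw [heq]
    have hne : x ≠ kv.1 := by
      rintro rfl
      rw [PySem.Dict.contains_eq_isSome_get?, h] at hc
      simp at hc
    simp [PySem.Dict.get?_insert, hne, h]

theorem pvfold_mono {t : PySem.Dict String Int × Bool} {x : String} {v : Int}
    (l : List (String × Option String)) (h : t.1.get? x = some v) :
    (l.foldl pvStepB t).1.get? x = some v := by
  induction l generalizing t with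
  | nil => exact h
  | cons kv rest ih => exact ih (pvstep_mono h)

theorem pvfold_good {d : PySem.Dict String (Option String)} (hkeys : d.keys.Nodup) :
    ∀ (l : List (String × Option String)) (t : PySem.Dict String Int × Bool),
      (∀ kv ∈ l, kv ∈ d.items) → PVGood d t.1 → PVGood d (l.foldl pvStepB t).1 := by
  intro l
  induction l with
  | nil => intro t _ hg; exact hg
  | cons kv rest ih =>
    intro t hl hg
    refine ih _ (fun x hx => hl x (List.mem_cons_of_mem _ hx)) ?_
    rcases pvstep_cases t kv with heq | ⟨p, dp, ho, hc, hg2, heq⟩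
    · rw [heq]; exact hg
    · rw [heq]
      intro k v hkv2
      rw [PySem.Dict.get?_insert] at hkv2
      by_cases hk : k = kv.1
      · rw [if_pos hk] at hkv2
        cases hkv2
        rw [hk]
        have hmem : (kv.1, some p) ∈ d.items := by
          have := hl kv List.mem_cons_self
          rwa [show kv = (kv.1, some p) from Prod.ext rfl ho] at this
        exact PVDepth.succ (PySem.Dict.get?_of_mem_items d hmem hkeys) (hg p dp hg2)
      · rw [if_neg hk] at hkv2
        exact hg k v hkv2

theorem pvinit_good {d : PySem.Dict String (Option String)} (hkeys : d.keys.Nodup)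
    (l : List (String × Option String)) (hl : ∀ kv ∈ l, kv ∈ d.items) :
    PVGood d (pvInitB l) := by
  have main : ∀ (l : List (String × Option String)) (t : PySem.Dict String Int),
      (∀ kv ∈ l, kv ∈ d.items) → PVGood d t →
      PVGood d (l.foldl (fun t kv =>
        match kv.2 with
        | none => t.insert kv.1 0
        | some _ => t) t) := by
    intro l
    induction l with
    | nil => intro t _ hg; exact hg
    | cons kv rest ih =>
      intro t hl hg
      refine ih _ (fun x hx => hl x (List.mem_cons_of_mem _ hx)) ?_
      obtain ⟨k0, o⟩ := kv
      cases o with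
      | some p => exact hg
      | none =>
        intro k v hkv2
        rw [PySem.Dict.get?_insert] at hkv2
        by_cases hk : k = k0
        · rw [if_pos hk] at hkv2
          cases hkv2
          rw [hk]
          exact PVDepth.zero (PySem.Dict.get?_of_mem_items d (hl (k0, none) List.mem_cons_self) hkeys)
        · rw [if_neg hk] at hkv2
          exact hg k v hkv2
  refine main l PySem.Dict.empty hl ?_
  intro k v hkv
  rw [PySem.Dict.get?_empty] at hkv
  cases hkv

theorem pvinit_has {k : String} :
    ∀ (l : List (String × Option String)) (t : PySem.Dict String Int),
      (k, none) ∈ l ∨ (∃ v, t.get? k = some v) →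
      ∃ v, (l.foldl (fun t kv =>
        match kv.2 with
        | none => t.insert kv.1 0
        | some _ => t) t).get? k = some v := by
  intro l
  induction l with
  | nil =>
    intro t h
    rcases h with h | h
    · cases h
    · exact h
  | cons kv rest ih =>
    intro t h
    obtain ⟨k0, o⟩ := kv
    refine ih _ ?_
    rcases h with h | ⟨v, hv⟩
    · rcases List.mem_cons.mp h with heq | h
      · cases heq
        right
        exact ⟨0, by simp⟩
      · left; exact h
    · right
      cases o with
      | some p => exact ⟨v, hv⟩
      | none =>
        by_cases hk : k = k0
        · exact ⟨0, by simp [hk]⟩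
        · exact ⟨v, by simp [PySem.Dict.get?_insert, hk, hv]⟩

theorem pvfold_flag_true :
    ∀ (l : List (String × Option String)) (t : PySem.Dict String Int × Bool),
      t.2 = true → (l.foldl pvStepB t).2 = true := by
  intro l
  induction l with
  | nil => intro t h; exact h
  | cons kv rest ih =>
    intro t h
    refine ih _ ?_
    rcases pvstep_cases t kv with heq | ⟨p, dp, _, _, _, heq⟩ <;> rw [heq]
    exact h

-- a round that ends with changed = false changed nothing and certifies the fixed point
theorem pvfold_false :
    ∀ (l : List (String × Option String)) (T : PySem.Dict String Int),
      (l.foldl pvStepB (T, false)).2 = false →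
      (l.foldl pvStepB (T, false)).1 = T ∧
        ∀ k p, (k, some p) ∈ l → T.contains k = true ∨ T.get? p = none := by
  intro l
  induction l with
  | nil => intro T _; exact ⟨rfl, by simp⟩
  | cons kv rest ih =>
    intro T hfalse
    rcases pvstep_cases (T, false) kv with heq | ⟨p, dp, ho, hc, hg, heq⟩
    · rw [List.foldl_cons, heq] at hfalse ⊢
      obtain ⟨h1, h2⟩ := ih T hfalse
      refine ⟨h1, ?_⟩
      intro k q hkq
      rcases List.mem_cons.mp hkq with hh | hh
      · -- head item left the state unchanged: its guard failed
        subst hh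
        by_cases hck : T.contains k = true
        · exact Or.inl hck
        · cases hgq : T.get? q with
          | none => exact Or.inr rfl
          | some dq =>
            exfalso
            have : pvStepB (T, false) (k, some q) = (T.insert k (dq + 1), true) := by
              simp [pvStepB, hck, hgq]
            rw [this] at heq
            have := congrArg Prod.snd heq
            simp at this
      · exact h2 k q hh
    · exfalso
      rw [List.foldl_cons, heq] at hfalse
      have := pvfold_flag_true rest ((T, false).1.insert kv.1 (dp + 1), true) rfl
      rw [hfalse] at this
      cases this

theorem pvfold_size_mono :
    ∀ (l : List (String × Option String)) (t : PySem.Dict String Int × Bool),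
      t.1.size ≤ (l.foldl pvStepB t).1.size := by
  intro l
  induction l with
  | nil => intro t; exact le_refl _
  | cons kv rest ih =>
    intro t
    have h1 : t.1.size ≤ (pvStepB t kv).1.size := by
      rcases pvstep_cases t kv with heq | ⟨p, dp, ho, hc, hg, heq⟩ <;> rw [heq]
      rw [PySem.Dict.size_insert]
      simp [hc]
    simp only [List.foldl_cons]
    exact Nat.le_trans h1 (ih (pvStepB t kv))

theorem pvfold_true_size :
    ∀ (l : List (String × Option String)) (T : PySem.Dict String Int),
      (l.foldl pvStepB (T, false)).2 = true →
      T.size + 1 ≤ (l.foldl pvStepB (T, false)).1.size := by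
  intro l
  induction l with
  | nil => intro T h; cases h
  | cons kv rest ih =>
    intro T htrue
    rcases pvstep_cases (T, false) kv with heq | ⟨p, dp, ho, hc, hg, heq⟩
    · rw [List.foldl_cons, heq] at htrue ⊢
      exact ih T htrue
    · rw [List.foldl_cons, heq]
      have hmono := pvfold_size_mono rest (T.insert kv.1 (dp + 1), true)
      have hsz : (T.insert kv.1 (dp + 1)).size = T.size + 1 := by
        rw [PySem.Dict.size_insert]; simp [hc]
      simp only [hsz] at hmono
      exact hmono

def PVKeysOK (d : PySem.Dict String (Option String)) (t : PySem.Dict String Int) : Prop :=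
  t.keys.Nodup ∧ ∀ k ∈ t.keys, k ∈ d.keys

theorem pvfold_keysok {d : PySem.Dict String (Option String)} :
    ∀ (l : List (String × Option String)) (t : PySem.Dict String Int × Bool),
      (∀ kv ∈ l, kv ∈ d.items) → PVKeysOK d t.1 → PVKeysOK d (l.foldl pvStepB t).1 := by
  intro l
  induction l with
  | nil => intro t _ h; exact h
  | cons kv rest ih =>
    intro t hl hok
    refine ih _ (fun x hx => hl x (List.mem_cons_of_mem _ hx)) ?_
    rcases pvstep_cases t kv with heq | ⟨p, dp, ho, hc, hg, heq⟩
    · rw [heq]; exact hok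
    · rw [heq]
      refine ⟨PySem.Dict.nodup_keys_insert _ _ _ hok.1, ?_⟩
      intro k hk
      rcases (PySem.Dict.mem_keys_insert _ _ _ _).mp hk with rfl | hk
      · have := hl kv List.mem_cons_self
        exact List.mem_map.mpr ⟨kv, this, rfl⟩
      · exact hok.2 k hk

theorem pvinit_keysok {d : PySem.Dict String (Option String)}
    (l : List (String × Option String)) (hl : ∀ kv ∈ l, kv ∈ d.items) :
    PVKeysOK d (pvInitB l) := by
  have main : ∀ (l : List (String × Option String)) (t : PySem.Dict String Int),
      (∀ kv ∈ l, kv ∈ d.items) → PVKeysOK d t →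
      PVKeysOK d (l.foldl (fun t kv =>
        match kv.2 with
        | none => t.insert kv.1 0
        | some _ => t) t) := by
    intro l
    induction l with
    | nil => intro t _ h; exact h
    | cons kv rest ih =>
      intro t hl hok
      refine ih _ (fun x hx => hl x (List.mem_cons_of_mem _ hx)) ?_
      obtain ⟨k0, o⟩ := kv
      cases o with
      | some p => exact hok
      | none =>
        refine ⟨PySem.Dict.nodup_keys_insert _ _ _ hok.1, ?_⟩
        intro k hk
        rcases (PySem.Dict.mem_keys_insert _ _ _ _).mp hk with rfl | hk
        · exact List.mem_map.mpr ⟨(k, none), hl (k, none) List.mem_cons_self, rfl⟩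
        · exact hok.2 k hk
  refine main l PySem.Dict.empty hl ?_
  constructor
  · simp [PySem.Dict.keys_empty]
  · intro k hk
    rw [PySem.Dict.keys_empty] at hk
    cases hk

theorem pvkeysok_size {d : PySem.Dict String (Option String)} {t : PySem.Dict String Int}
    (h : PVKeysOK d t) : t.size ≤ d.keys.length := by
  have := (List.subperm_of_subset h.1 h.2).length_le
  simpa [PySem.Dict.keys, PySem.Dict.size] using this

def PVFixed (items : List (String × Option String)) (t : PySem.Dict String Int) : Prop :=
  ∀ k p, (k, some p) ∈ items → t.contains k = true ∨ t.get? p = none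

theorem pvloop_mono {items : List (String × Option String)} {x : String} {v : Int} :
    ∀ (fuel : Nat) (t : PySem.Dict String Int), t.get? x = some v →
      (pvLoopB items fuel t).get? x = some v := by
  intro fuel
  induction fuel with
  | zero => intro t h; exact h
  | succ f ih =>
    intro t h
    simp only [pvLoopB]
    have hfold : (items.foldl pvStepB (t, false)).1.get? x = some v :=
      pvfold_mono items h
    split
    · exact ih _ hfold
    · exact hfold

theorem pvloop_good {d : PySem.Dict String (Option String)} (hkeys : d.keys.Nodup)
    {items : List (String × Option String)} (hl : ∀ kv ∈ items, kv ∈ d.items) :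
    ∀ (fuel : Nat) (t : PySem.Dict String Int), PVGood d t → PVGood d (pvLoopB items fuel t) := by
  intro fuel
  induction fuel with
  | zero => intro t h; exact h
  | succ f ih =>
    intro t h
    simp only [pvLoopB]
    have hfold : PVGood d (items.foldl pvStepB (t, false)).1 :=
      pvfold_good hkeys items (t, false) hl h
    split
    · exact ih _ hfold
    · exact hfold

theorem pvloop_fixed {d : PySem.Dict String (Option String)}
    {items : List (String × Option String)} (hl : ∀ kv ∈ items, kv ∈ d.items) :
    ∀ (fuel : Nat) (t : PySem.Dict String Int), PVKeysOK d t →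
      d.keys.length < t.size + fuel → PVFixed items (pvLoopB items fuel t) := by
  intro fuel
  induction fuel with
  | zero =>
    intro t hok hlt
    exact absurd (pvkeysok_size hok) (by omega)
  | succ f ih =>
    intro t hok hlt
    simp only [pvLoopB]
    split
    · rename_i hflag
      refine ih _ (pvfold_keysok items (t, false) hl hok) ?_
      have := pvfold_true_size items t hflag
      omega
    · rename_i hflag
      have hfalse : (items.foldl pvStepB (t, false)).2 = false := by
        simpa using hflag
      obtain ⟨heq, hfix⟩ := pvfold_false items t hfalse
      rw [heq]
      exact hfix

theorem pvcomplete {d : PySem.Dict String (Option String)}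
    {T : PySem.Dict String Int} (hfix : PVFixed d.items T)
    (hinit : ∀ k, d.get? k = some none → ∃ v, T.get? k = some v) :
    ∀ {k : String} {n : Int}, PVDepth d k n → ∃ v, T.get? k = some v := by
  intro k n h
  induction h with
  | zero hk => exact hinit _ hk
  | @succ k2 p2 n2 hk hp ih =>
    obtain ⟨vp, hvp⟩ := ih
    rcases hfix _ _ (PySem.Dict.mem_items_of_get?_eq_some _ hk) with hck | hgp
    · rw [PySem.Dict.contains_eq_isSome_get?] at hck
      cases hgk : T.get? k2 with
      | none => rw [hgk] at hck; cases hck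
      | some v => exact ⟨v, rfl⟩
    · rw [hvp] at hgp; cases hgp

-- ===== VERDICT =====
theorem build_problem_type_depth_py_spec : Claim_equal_build_problem_type_depth_py := by
  intro name l _ hpre
  obtain ⟨hnodup, n, hn, c, hnode, hend⟩ := hpre
  unfold Spec_build_problem_type_depth_py build_problem_type_depth_py build_problem_type_depth_py_alt
  set d := PySem.Dict.mk l with hd
  have hitems : d.items = l := rfl
  have hkeys : d.keys.Nodup := hnodup
  have hlen : d.keys.length = l.length := by
    simp [PySem.Dict.keys, hitems]
  have hdep : PVDepth d name (n : Int) := pvNodeAt_depth n name c hnode hend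
  -- A's recursion returns the chain depth n
  have hA : pvGoA d (l.length + 1) name = (n : Int) := by
    apply pvGoA_eq hdep
    have := pvdepth_lt hdep
    omega
  -- B's fixed-point table maps name to the same n
  have hsub : ∀ kv ∈ d.items, kv ∈ d.items := fun kv h => h
  have hgood : PVGood d (pvLoopB d.items (d.items.length + 1) (pvInitB d.items)) :=
    pvloop_good hkeys hsub _ _ (pvinit_good hkeys _ hsub)
  have hfix : PVFixed d.items (pvLoopB d.items (d.items.length + 1) (pvInitB d.items)) := by
    refine pvloop_fixed hsub _ _ (pvinit_keysok _ hsub) ?_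
    have : d.items.length = l.length := by rw [hitems]
    omega
  have hinit : ∀ k, d.get? k = some none →
      ∃ v, (pvLoopB d.items (d.items.length + 1) (pvInitB d.items)).get? k = some v := by
    intro k hk
    have hkmem : (k, none) ∈ d.items := PySem.Dict.mem_items_of_get?_eq_some d hk
    have h0 : ∃ v, (pvInitB d.items).get? k = some v := by
      simpa [pvInitB] using pvinit_has d.items PySem.Dict.empty (Or.inl hkmem)
    obtain ⟨v, hv⟩ := h0
    exact ⟨v, pvloop_mono _ _ hv⟩
  obtain ⟨v, hv⟩ := pvcomplete hfix hinit hdep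
  have hvn : v = (n : Int) := pvdepth_det (hgood name v hv) hdep
  show pvGoA d (l.length + 1) name = _
  rw [hA]
  show (n : Int) = ((pvLoopB d.items (d.items.length + 1) (pvInitB d.items)).get? name).getD 0
  rw [hv, hvn]
  rfl
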